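-- pv_equiv track=rewrite | github.com/gvrijswijk/adventofcode | 2017/00_warmup.py | parse
-- ===== SOURCE A (Python) =====
-- def parse(m):
--     t, X, Y = [], [], []
--     x, y = 0, 0
--
--     for e in m:
--
--         if e == "A" or e == "B":
--             t.append(e)
--             X.append(x)
--             Y.append(y)
--         elif e == "Up":
--             y += 1
--         elif e == "Down":
--             y -= 1
--         elif e == "Left":
--             x -= 1
--         elif e == "Right":
--             x += 1
--
--     return (t, X, Y)
-- ===== SOURCE B (Python) =====
-- DELTA = {"Up": (0, 1), "Down": (0, -1), "Left": (-1, 0), "Right": (1, 0)}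
--
-- def parse(m):
--     # stage 1: prefix-sum the movement deltas -> position before each token
--     pos = []
--     x = y = 0
--     for e in m:
--         pos.append((x, y))
--         dx, dy = DELTA.get(e, (0, 0))
--         x += dx
--         y += dy
--     # stage 2: select the marker tokens and their recorded positions
--     t = [e for e in m if e in ("A", "B")]
--     X = [p[0] for p, e in zip(pos, m) if e in ("A", "B")]
--     Y = [p[1] for p, e in zip(pos, m) if e in ("A", "B")]
--     return (t, X, Y)
-- ===== Notes on version B (the rewrite author's own statement) =====
-- stated objective: alternative
-- what changed: Replaced the single interleaved update-and-record loop by a two-stage pipeline: a prefix-sum pass over movement deltas building a positions array, then filter/select passes picking the 'A'/'B' markers and their recorded coordinates.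
import Mathlib
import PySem

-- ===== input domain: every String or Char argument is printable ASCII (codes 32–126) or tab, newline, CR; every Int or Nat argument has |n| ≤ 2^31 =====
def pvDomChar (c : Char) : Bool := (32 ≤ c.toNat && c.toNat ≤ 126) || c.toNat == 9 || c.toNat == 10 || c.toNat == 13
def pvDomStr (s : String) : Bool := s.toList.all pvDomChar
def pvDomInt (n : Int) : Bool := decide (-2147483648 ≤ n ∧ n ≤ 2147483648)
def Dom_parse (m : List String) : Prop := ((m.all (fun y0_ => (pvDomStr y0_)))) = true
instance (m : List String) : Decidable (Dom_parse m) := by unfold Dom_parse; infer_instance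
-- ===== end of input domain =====

-- B is an alternative decomposition (two-stage: prefix-sum positions, then filter markers); equivalence of the RETURN value is proved.

-- ===== PORT A =====
-- the single loop of A, carrying (t, X, Y, x, y) as state
def parseAux : List String → List String → List Int → List Int → Int → Int → List String × List Int × List Int
  | [], t, X, Y, _, _ => (t, X, Y)
  | e :: rest, t, X, Y, x, y =>
    if e = "A" ∨ e = "B" then parseAux rest (t ++ [e]) (X ++ [x]) (Y ++ [y]) x y
    else if e = "Up" then parseAux rest t X Y x (y + 1)
    else if e = "Down" then parseAux rest t X Y x (y - 1)
    else if e = "Left" then parseAux rest t X Y (x - 1) y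
    else if e = "Right" then parseAux rest t X Y (x + 1) y
    else parseAux rest t X Y x y

def parse (m : List String) : List String × List Int × List Int :=
  parseAux m [] [] [] 0 0

-- ===== PORT B =====
-- DELTA.get(e, (0,0))
def pvDelta (e : String) : Int × Int :=
  if e = "Up" then (0, 1)
  else if e = "Down" then (0, -1)
  else if e = "Left" then (-1, 0)
  else if e = "Right" then (1, 0)
  else (0, 0)

-- stage 1 of B: position before each token, by prefix-summing the deltas
def pvPositions : List String → Int → Int → List (Int × Int)
  | [], _, _ => []
  | e :: rest, x, y => (x, y) :: pvPositions rest (x + (pvDelta e).1) (y + (pvDelta e).2)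

def pvIsMarker (e : String) : Bool := e = "A" || e = "B"

def parse_alt (m : List String) : List String × List Int × List Int :=
  let pos := pvPositions m 0 0
  let t := m.filter pvIsMarker
  let X := (((pos.zip m).filter (fun pe => pvIsMarker pe.2)).map (fun pe => pe.1.1))
  let Y := (((pos.zip m).filter (fun pe => pvIsMarker pe.2)).map (fun pe => pe.1.2))
  (t, X, Y)

-- ===== PRECONDITION & SPEC =====
def Spec_parse (m : List String) (out : List String × List Int × List Int) : Prop := out = parse_alt m
instance (m : List String) (out : List String × List Int × List Int) : Decidable (Spec_parse m out) := by unfold Spec_parse; infer_instance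

-- ===== CLAIM (what is proved, stated in full; the proofs are below) =====
def Claim_equal_parse : Prop := ∀ (m : List String), Dom_parse m → Spec_parse m (parse m)

-- ===== LEMMAS AND PROOFS =====

lemma parseAux_eq (m : List String) : ∀ (t : List String) (X Y : List Int) (x y : Int),
    parseAux m t X Y x y =
      (t ++ m.filter pvIsMarker,
       X ++ (((pvPositions m x y).zip m).filter (fun pe => pvIsMarker pe.2)).map (fun pe => pe.1.1),
       Y ++ (((pvPositions m x y).zip m).filter (fun pe => pvIsMarker pe.2)).map (fun pe => pe.1.2)) := by
  induction m with
  | nil => intro t X Y x y; simp only [parseAux, pvPositions, List.filter_nil, List.zip_nil_left,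
      List.map_nil, List.append_nil]
  | cons e rest ih =>
    intro t X Y x y
    by_cases hm : e = "A" ∨ e = "B"
    · have hb : pvIsMarker e = true := by rcases hm with h | h <;> subst h <;> decide
      have hd : pvDelta e = (0, 0) := by rcases hm with h | h <;> subst h <;> decide
      simp only [parseAux, if_pos hm, pvPositions, hd, add_zero, List.zip_cons_cons,
        List.filter_cons, hb, if_true, List.map_cons, ih, List.append_assoc,
        List.cons_append, List.nil_append]
    · have hb : pvIsMarker e = false := by
        simp only [pvIsMarker, Bool.or_eq_false_iff, decide_eq_false_iff_not]
        rw [not_or] at hm; exact ⟨hm.1, hm.2⟩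
      have key : ∀ x' y', pvDelta e = (x' - x, y' - y) →
          parseAux rest t X Y x' y' = parseAux (e :: rest) t X Y x y →
          parseAux (e :: rest) t X Y x y =
          (t ++ (e :: rest).filter pvIsMarker,
           X ++ (((pvPositions (e :: rest) x y).zip (e :: rest)).filter (fun pe => pvIsMarker pe.2)).map (fun pe => pe.1.1),
           Y ++ (((pvPositions (e :: rest) x y).zip (e :: rest)).filter (fun pe => pvIsMarker pe.2)).map (fun pe => pe.1.2)) := by
        intro x' y' hd hstep
        have hx : x + (x' - x) = x' := by ring
        have hy : y + (y' - y) = y' := by ring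
        rw [← hstep, ih]
        simp only [pvPositions, hd, hx, hy, List.zip_cons_cons, List.filter_cons, hb,
          Bool.false_eq_true, if_false]
      by_cases h1 : e = "Up"
      · subst h1
        exact key x (y + 1) (by simp [pvDelta]) rfl
      · by_cases h2 : e = "Down"
        · subst h2
          exact key x (y - 1) (by simp [pvDelta]) rfl
        · by_cases h3 : e = "Left"
          · subst h3
            exact key (x - 1) y (by simp [pvDelta]) rfl
          · by_cases h4 : e = "Right"
            · subst h4
              exact key (x + 1) y (by simp [pvDelta]) rfl
            · exact key x y (by simp [pvDelta, h1, h2, h3, h4]) (by simp only [parseAux]; rw [if_neg hm, if_neg h1, if_neg h2, if_neg h3, if_neg h4])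

-- ===== VERDICT (by name: the statement is the Claim_ definition above) =====
theorem parse_spec : Claim_equal_parse := by
  intro m _
  unfold Spec_parse parse parse_alt
  rw [parseAux_eq]
  simp only [List.nil_append]
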